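-- pv_equiv track=rewrite | github.com/jhlee91720/jhu_software_concepts | module_4/src/app.py | is_cs_program
-- ===== SOURCE A (Python) =====
-- def normalize_text(s):
--     if not s:
--         return ""
--     s = s.lower()
--     for ch in [",", ".", "-", "_", "/", "(", ")", ":", ";"]:
--         s = s.replace(ch, " ")
--     return " ".join(s.split())
--
-- def is_cs_program(text):
--     t = normalize_text(text)
--     tokens = t.split()
--
--     if "computer science" in t or "compsci" in t or "comp sci" in t:
--         return True
--
--     # handle CS / C.S.
--     for i in range(len(tokens)-1):
--         if tokens[i] == "c" and tokens[i+1] == "s":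
--             return True
--     if "cs" in tokens:
--         return True
--
--     return False
-- ===== SOURCE B (Python) =====
-- def normalize_text(s):
--     if not s:
--         return ""
--     s = s.lower()
--     for ch in [",", ".", "-", "_", "/", "(", ")", ":", ";"]:
--         s = s.replace(ch, " ")
--     return " ".join(s.split())
--
-- def is_cs_program(text):
--     # Tokenization-free: after normalization the text is single-space separated,
--     # so the whole-token tests become substring searches on a space-padded copy.
--     t = normalize_text(text)
--     padded = " " + t + " "
--     return ("computer science" in t or "compsci" in t or "comp sci" in t
--             or " cs " in padded or " c s " in padded)
-- ===== Notes on version B (the rewrite author's own statement) =====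
-- stated objective: alternative
-- what changed: B eliminates the token list entirely: instead of splitting the normalized text and running an index loop over adjacent tokens plus a membership scan, it pads the normalized text with one space on each side and performs all five checks as plain substring searches (" cs " and " c s " on the padded copy), which is correct because normalize_text guarantees single-space separation.
import Mathlib
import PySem

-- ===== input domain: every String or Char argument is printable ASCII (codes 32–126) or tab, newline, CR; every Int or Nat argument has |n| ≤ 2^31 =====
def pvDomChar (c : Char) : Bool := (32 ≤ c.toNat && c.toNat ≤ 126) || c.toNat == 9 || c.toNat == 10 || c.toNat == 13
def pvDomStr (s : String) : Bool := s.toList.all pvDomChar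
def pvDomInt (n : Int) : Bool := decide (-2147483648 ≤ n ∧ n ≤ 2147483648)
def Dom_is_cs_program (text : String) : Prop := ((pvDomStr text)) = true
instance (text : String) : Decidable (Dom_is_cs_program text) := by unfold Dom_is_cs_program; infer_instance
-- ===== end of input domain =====

set_option maxRecDepth 8192


-- B drops the tokenization entirely: after normalize_text the text is single-space
-- separated, so both whole-token tests become substring searches on a space-padded copy;
-- same cost, no token list and no index loop (objective: alternative).

-- ===== PORT A =====
-- shared module helper normalize_text (used verbatim by both Pythons)
def normalize_text (s : String) : String :=
  if s == "" then ""
  else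
    let s1 := PySem.Str.lower s
    let s2 := [",", ".", "-", "_", "/", "(", ")", ":", ";"].foldl
      (fun acc ch => PySem.Str.replace acc ch " ") s1
    PySem.Str.join " " (PySem.Str.split₀ s2)

def is_cs_program (text : String) : Bool :=
  let t := normalize_text text
  let tokens := PySem.Str.split₀ t
  if PySem.Str.isIn "computer science" t || PySem.Str.isIn "compsci" t ||
     PySem.Str.isIn "comp sci" t then true
  -- for i in range(len(tokens)-1) with an early 'return True', ported as .any over the
  -- same index range (Nat subtraction gives the same empty range as Python's range(-1))
  else if (List.range (tokens.length - 1)).any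
      (fun i => tokens.getD i "" == "c" && tokens.getD (i + 1) "" == "s") then true
  else if tokens.contains "cs" then true
  else false

-- ===== PORT B =====
-- padded = " " + t + " ", built on the character list (Python string concatenation)
def is_cs_program_alt (text : String) : Bool :=
  let t := normalize_text text
  let padded : List Char := ' ' :: t.toList ++ [' ']
  PySem.Str.isIn "computer science" t || PySem.Str.isIn "compsci" t ||
    PySem.Str.isIn "comp sci" t ||
    PySem.Chars.isIn " cs ".toList padded || PySem.Chars.isIn " c s ".toList padded

-- ===== PRECONDITION & SPEC =====
def Spec_is_cs_program (text : String) (out : Bool) : Prop := out = is_cs_program_alt text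
instance (text : String) (out : Bool) : Decidable (Spec_is_cs_program text out) := by unfold Spec_is_cs_program; infer_instance

-- ===== CLAIM (what is proved, stated in full; the proofs are below) =====
def Claim_equal_is_cs_program : Prop := ∀ (text : String), Dom_is_cs_program text → Spec_is_cs_program text (is_cs_program text)

-- ===== LEMMAS AND PROOFS =====

-- a good token: nonempty and whitespace-free (what normalize_text's split() produces)
def OkTok (w : List Char) : Prop := w ≠ [] ∧ ∀ c ∈ w, PySem.Chars.isspace c = false

-- leading-separator form of the joined string: " w1 w2 … wn"
def padV (ws : List (List Char)) : List Char := ws.flatMap (fun w => ' ' :: w)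

lemma padV_nil : padV [] = [] := rfl
lemma padV_cons (w : List Char) (ws : List (List Char)) :
    padV (w :: ws) = ' ' :: w ++ padV ws := rfl
lemma space_isspace : PySem.Chars.isspace ' ' = true := by decide

lemma okTok_no_space {w : List Char} (h : OkTok w) : ∀ c ∈ w, c ≠ ' ' := by
  intro c hc he; have := h.2 c hc; rw [he, space_isspace] at this; exact absurd this (by simp)

-- ' ' :: join " " ws  =  padV ws   (for nonempty ws)
lemma cons_join_eq_padV (ws : List (List Char)) (h : ws ≠ []) :
    ' ' :: PySem.Chars.join [' '] ws = padV ws := by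
  induction ws with
  | nil => exact absurd rfl h
  | cons w rest ih =>
    cases rest with
    | nil => simp [PySem.Chars.join_singleton, padV]
    | cons v r =>
      rw [PySem.Chars.join_cons_cons, padV_cons, ← ih (by simp)]
      simp

-- padV ws ++ [' '] always starts with a space
lemma padV_head (ws : List (List Char)) : ∃ A, padV ws ++ [' '] = ' ' :: A := by
  cases ws with
  | nil => exact ⟨[], rfl⟩
  | cons w rest => exact ⟨w ++ padV rest ++ [' '], by simp [padV_cons]⟩

-- alignment: space-free blocks before a space must coincide
lemma aligned_prefix {v w A B : List Char} (hv : ∀ c ∈ v, c ≠ ' ') (hw : ∀ c ∈ w, c ≠ ' ') :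
    (v ++ ' ' :: A <+: w ++ ' ' :: B) ↔ (v = w ∧ A <+: B) := by
  induction v generalizing w with
  | nil =>
    cases w with
    | nil => simp [List.cons_prefix_cons]
    | cons c w' =>
      simp only [List.nil_append, List.cons_append, List.cons_prefix_cons]
      constructor
      · rintro ⟨he, -⟩; exact absurd he.symm (hw c (by simp))
      · rintro ⟨he, -⟩; exact absurd he (by simp)
  | cons c v' ih =>
    cases w with
    | nil =>
      simp only [List.cons_append, List.nil_append, List.cons_prefix_cons]
      constructor
      · rintro ⟨he, -⟩; exact absurd he (hv c (by simp))
      · rintro ⟨he, -⟩; exact absurd he (by simp)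
    | cons d w' =>
      simp only [List.cons_append, List.cons_prefix_cons]
      rw [ih (fun x hx => hv x (by simp [hx])) (fun x hx => hw x (by simp [hx]))]
      constructor
      · rintro ⟨he, h1, h2⟩; exact ⟨by rw [he, h1], h2⟩
      · rintro ⟨he, h2⟩; injection he with h1 h3; exact ⟨h1, h3, h2⟩

-- a pattern starting with ' ' cannot start inside a space-free block
lemma infix_skip_block {p S : List Char} (w : List Char) (hp : ∃ q, p = ' ' :: q)
    (hw : ∀ c ∈ w, c ≠ ' ') : (p <:+: w ++ S) ↔ (p <:+: S) := by
  induction w with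
  | nil => simp
  | cons c w' ih =>
    rw [List.cons_append, List.infix_cons_iff,
        ih (fun x hx => hw x (by simp [hx]))]
    constructor
    · rintro (hpre | h)
      · obtain ⟨q, rfl⟩ := hp
        rw [List.cons_prefix_cons] at hpre
        exact absurd hpre.1.symm (hw c (by simp))
      · exact h
    · exact Or.inr

def OkList (ws : List (List Char)) : Prop := ∀ w ∈ ws, OkTok w

-- prefix form of the main correspondence
lemma padV_prefix_iff (ws toks : List (List Char)) (hws : OkList ws) (ht : OkList toks) :
    (padV ws ++ [' '] <+: padV toks ++ [' ']) ↔ ws <+: toks := by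
  induction ws generalizing toks with
  | nil =>
    simp only [padV_nil, List.nil_append, List.nil_prefix, iff_true]
    obtain ⟨A, hA⟩ := padV_head toks
    rw [hA]; exact ⟨A, rfl⟩
  | cons v ws' ih =>
    cases toks with
    | nil =>
      simp only [padV_nil, List.nil_append, List.prefix_nil]
      constructor
      · intro h
        have := List.IsPrefix.length_le h
        simp [padV_cons] at this
      · intro h; simp at h
    | cons w rest =>
      obtain ⟨A, hA⟩ := padV_head ws'
      obtain ⟨B, hB⟩ := padV_head rest
      have e1 : padV (v :: ws') ++ [' '] = ' ' :: (v ++ (padV ws' ++ [' '])) := by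
        simp [padV_cons]
      have e2 : padV (w :: rest) ++ [' '] = ' ' :: (w ++ (padV rest ++ [' '])) := by
        simp [padV_cons]
      rw [e1, e2, List.cons_prefix_cons, hA, hB,
          aligned_prefix (okTok_no_space (hws v (by simp)))
            (okTok_no_space (ht w (by simp))),
          List.cons_prefix_cons]
      have hAB : (A <+: B) ↔ ws' <+: rest := by
        rw [show (A <+: B) ↔ (' ' :: A <+: ' ' :: B) from by
              rw [List.cons_prefix_cons]; simp,
            ← hA, ← hB]
        exact ih rest (fun x hx => hws x (List.mem_cons_of_mem _ hx))
          (fun x hx => ht x (List.mem_cons_of_mem _ hx))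
      rw [hAB]
      simp

-- MAIN LEMMA: an occurrence of the padded pattern in the padded text is a
-- consecutive run of whole tokens
lemma padV_infix_iff (toks ws : List (List Char)) (hne : ws ≠ []) (hws : OkList ws)
    (ht : OkList toks) : (padV ws ++ [' '] <:+: padV toks ++ [' ']) ↔ ws <:+: toks := by
  induction toks with
  | nil =>
    simp only [padV_nil, List.nil_append, List.infix_nil]
    constructor
    · intro h
      have hl := List.IsInfix.length_le h
      cases ws with
      | nil => exact absurd rfl hne
      | cons v ws' =>
        have hv : v ≠ [] := (hws v (by simp)).1
        cases v with
        | nil => exact absurd rfl hv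
        | cons c v' => simp [padV_cons] at hl
    · intro h; subst h; simp [padV]
  | cons w rest ih =>
    have hrest : OkList rest := fun x hx => ht x (List.mem_cons_of_mem _ hx)
    have et : padV (w :: rest) ++ [' '] = ' ' :: (w ++ (padV rest ++ [' '])) := by
      simp [padV_cons]
    rw [et, List.infix_cons_iff,
        infix_skip_block w (padV_head ws) (okTok_no_space (ht w (by simp))),
        ih hrest, ← et,
        padV_prefix_iff ws (w :: rest) hws ht,
        List.infix_cons_iff]

-- ===== facts about split₀ =====

lemma split₀_go_ok (s : List Char) : ∀ cur acc,
    (∀ c ∈ cur, PySem.Chars.isspace c = false) → (∀ w ∈ acc, OkTok w) →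
    ∀ w ∈ PySem.Chars.split₀.go s cur acc, OkTok w := by
  induction s with
  | nil =>
    intro cur acc hcur hacc w hw
    rw [PySem.Chars.split₀.go] at hw
    by_cases h : cur.isEmpty
    · simp only [h, if_true] at hw
      exact hacc w (List.mem_reverse.1 hw)
    · simp only [h, Bool.false_eq_true, if_false] at hw
      rw [List.mem_reverse, List.mem_cons] at hw
      rcases hw with rfl | hw
      · refine ⟨by simpa [List.isEmpty_iff] using h, ?_⟩
        intro c hc; exact hcur c (List.mem_reverse.1 hc)
      · exact hacc w hw
  | cons c rest ih =>
    intro cur acc hcur hacc w hw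
    rw [PySem.Chars.split₀.go] at hw
    by_cases hs : PySem.Chars.isspace c
    · by_cases h : cur.isEmpty
      · simp [hs, h] at hw
        exact ih [] acc (by simp) hacc w hw
      · simp [hs, h] at hw
        refine ih [] (cur.reverse :: acc) (by simp) ?_ w hw
        intro v hv
        rcases List.mem_cons.1 hv with hv | hv
        · subst hv
          exact ⟨by simpa [List.isEmpty_iff] using h, by
            intro x hx; exact hcur x (by simpa using hx)⟩
        · exact hacc v hv
    · simp [hs] at hw
      refine ih (c :: cur) acc ?_ hacc w hw
      intro x hx
      rcases List.mem_cons.1 hx with hx | hx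
      · subst hx; simpa using hs
      · exact hcur x hx

lemma split₀_ok (s : List Char) : OkList (PySem.Chars.split₀ s) := by
  intro w hw
  exact split₀_go_ok s [] [] (by simp) (by simp) w hw

-- go consumes a whitespace-free block into cur
lemma split₀_go_block (v : List Char) (hv : ∀ c ∈ v, PySem.Chars.isspace c = false) :
    ∀ rest cur acc, PySem.Chars.split₀.go (v ++ rest) cur acc
      = PySem.Chars.split₀.go rest (v.reverse ++ cur) acc := by
  induction v with
  | nil => intro rest cur acc; simp
  | cons c v' ih =>
    intro rest cur acc
    rw [List.cons_append, PySem.Chars.split₀.go]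
    have hc : PySem.Chars.isspace c = false := hv c (by simp)
    simp only [hc, Bool.false_eq_true, if_false]
    rw [ih (fun x hx => hv x (by simp [hx]))]
    simp

-- split₀ recovers the tokens of a single-space join
lemma split₀_go_join (ws : List (List Char)) (h : OkList ws) : ∀ acc,
    PySem.Chars.split₀.go (PySem.Chars.join [' '] ws) [] acc = acc.reverse ++ ws := by
  induction ws with
  | nil => intro acc; rw [PySem.Chars.join_nil, PySem.Chars.split₀.go]; simp
  | cons w rest ih =>
    intro acc
    obtain ⟨hwne, hwsp⟩ := h w (by simp)
    cases rest with
    | nil =>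
      rw [PySem.Chars.join_singleton, ← List.append_nil w, split₀_go_block w hwsp]
      rw [PySem.Chars.split₀.go]
      simp [hwne]
    | cons v r =>
      rw [PySem.Chars.join_cons_cons, List.append_assoc, split₀_go_block w hwsp]
      rw [List.singleton_append, PySem.Chars.split₀.go]
      simp only [space_isspace, if_true]
      have hne' : (w.reverse ++ ([] : List Char)).isEmpty = false := by
        simp [hwne]
      simp only [hne', Bool.false_eq_true, if_false]
      have h' : OkList (v :: r) := fun x hx => h x (List.mem_cons_of_mem _ hx)
      rw [List.append_nil, List.reverse_reverse, ih h' (w :: acc)]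
      simp

lemma split₀_join (ws : List (List Char)) (h : OkList ws) :
    PySem.Chars.split₀ (PySem.Chars.join [' '] ws) = ws := by
  show PySem.Chars.split₀.go _ [] [] = ws
  rw [split₀_go_join ws h []]; simp

-- ===== adjacency: A's index loop as structural recursion, then as an infix =====

def adjCS : List String → Bool
  | a :: b :: r => (a == "c" && b == "s") || adjCS (b :: r)
  | _ => false

lemma range_any_eq_adjCS (ts : List String) :
    (List.range (ts.length - 1)).any
      (fun i => ts.getD i "" == "c" && ts.getD (i + 1) "" == "s") = adjCS ts := by
  induction ts with
  | nil => simp [adjCS]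
  | cons a rest ih =>
    cases rest with
    | nil => simp [adjCS]
    | cons b r =>
      have hlen : (a :: b :: r).length - 1 = (b :: r).length := by simp
      rw [hlen]
      rw [show (b :: r).length = r.length + 1 from by simp, List.range_succ_eq_map]
      simp only [List.any_cons, List.any_map, adjCS]
      have h2 : ((List.range ((b :: r).length - 1)).any
        (fun i => (b :: r).getD i "" == "c" && (b :: r).getD (i + 1) "" == "s")) = adjCS (b :: r) := ih
      simp only [List.length_cons, Nat.add_sub_cancel] at h2
      rw [← h2]
      apply congrArg
      apply congrArg
      funext i
      simp [List.getD]

lemma adjCS_iff_infix (ts : List String) : adjCS ts = true ↔ ["c", "s"] <:+: ts := by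
  induction ts with
  | nil => simp [adjCS]
  | cons a rest ih =>
    cases rest with
    | nil =>
      simp only [adjCS, Bool.false_eq_true, false_iff]
      intro hinf
      have := List.IsInfix.length_le hinf
      simp at this
    | cons b r =>
      rw [List.infix_cons_iff]
      simp only [adjCS, Bool.or_eq_true, Bool.and_eq_true, beq_iff_eq, ih]
      constructor
      · rintro (⟨rfl, rfl⟩ | hin)
        · exact Or.inl ⟨r, rfl⟩
        · exact Or.inr hin
      · rintro (hpre | hin)
        · rw [List.cons_prefix_cons] at hpre
          obtain ⟨e1, hpre2⟩ := hpre
          rw [List.cons_prefix_cons] at hpre2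
          exact Or.inl ⟨e1.symm, hpre2.1.symm⟩
        · exact Or.inr hin

-- list-level membership / adjacency at the character level
lemma map_infix_iff (ws ts : List String) :
    (ws.map String.toList <:+: ts.map String.toList) ↔ ws <:+: ts := by
  constructor
  · intro h
    obtain ⟨l, hl, he⟩ := List.infix_map_iff.1 h
    have : ws = l := List.map_injective_iff.2 (fun _ _ => String.toList_injective) he
    rw [this]; exact hl
  · exact fun h => List.IsInfix.map _ h

-- ===== assembling the two ports =====

-- the two whole-token tests of A, as substring tests on the padded text
lemma core_mem (t : String) (W : List (List Char)) (hW : OkList W)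
    (ht : t.toList = PySem.Chars.join [' '] W) :
    (PySem.Str.split₀ t).contains "cs"
      = PySem.Chars.isIn " cs ".toList (' ' :: t.toList ++ [' ']) := by
  have hT : (PySem.Str.split₀ t).map String.toList = W := by
    rw [PySem.Str.split₀_map_toList, ht, split₀_join W hW]
  cases W with
  | nil =>
    have hTnil : PySem.Str.split₀ t = [] := List.map_eq_nil_iff.1 hT
    rw [hTnil, ht, PySem.Chars.join_nil]
    decide
  | cons w ws =>
    rw [Bool.eq_iff_iff, List.contains_iff_mem, PySem.Chars.isIn_iff_infix, ht,
        show (' ' :: PySem.Chars.join [' '] (w :: ws) ++ [' '])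
           = (' ' :: PySem.Chars.join [' '] (w :: ws)) ++ [' '] from rfl,
        cons_join_eq_padV (w :: ws) (by simp),
        show " cs ".toList = padV ["cs".toList] ++ [' '] from rfl,
        padV_infix_iff (w :: ws) ["cs".toList] (by simp)
          (by intro x hx; simp only [List.mem_singleton] at hx; subst hx
              exact ⟨by decide, by intro c hc; fin_cases hc <;> rfl⟩) hW,
        List.singleton_infix_iff, ← hT, List.mem_map]
    constructor
    · intro hm; exact ⟨"cs", hm, rfl⟩
    · rintro ⟨x, hx, he⟩
      have : x = "cs" := String.toList_injective he
      rw [← this]; exact hx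

lemma core_adj (t : String) (W : List (List Char)) (hW : OkList W)
    (ht : t.toList = PySem.Chars.join [' '] W) :
    adjCS (PySem.Str.split₀ t)
      = PySem.Chars.isIn " c s ".toList (' ' :: t.toList ++ [' ']) := by
  have hT : (PySem.Str.split₀ t).map String.toList = W := by
    rw [PySem.Str.split₀_map_toList, ht, split₀_join W hW]
  cases W with
  | nil =>
    have hTnil : PySem.Str.split₀ t = [] := List.map_eq_nil_iff.1 hT
    rw [hTnil, ht, PySem.Chars.join_nil]
    decide
  | cons w ws =>
    rw [Bool.eq_iff_iff, adjCS_iff_infix, PySem.Chars.isIn_iff_infix, ht,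
        show (' ' :: PySem.Chars.join [' '] (w :: ws) ++ [' '])
           = (' ' :: PySem.Chars.join [' '] (w :: ws)) ++ [' '] from rfl,
        cons_join_eq_padV (w :: ws) (by simp),
        show " c s ".toList = padV ["c".toList, "s".toList] ++ [' '] from rfl,
        padV_infix_iff (w :: ws) ["c".toList, "s".toList] (by simp)
          (by intro x hx
              rcases List.mem_cons.1 hx with rfl | hx
              · exact ⟨by decide, by intro c hc; fin_cases hc; rfl⟩
              · simp only [List.mem_singleton] at hx; subst hx
                exact ⟨by decide, by intro c hc; fin_cases hc; rfl⟩) hW,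
        show ["c".toList, "s".toList] = ["c", "s"].map String.toList from rfl,
        ← hT, map_infix_iff]

lemma if_chain (p q r : Bool) :
    (if p then true else if q then true else if r then true else false) = (p || (q || r)) := by
  cases p <;> cases q <;> cases r <;> rfl

lemma ports_agree (text : String) : is_cs_program text = is_cs_program_alt text := by
  by_cases h : text = ""
  · subst h; decide
  · have hbeq : (text == "") = false := by simpa using h
    set s2 := [",", ".", "-", "_", "/", "(", ")", ":", ";"].foldl
      (fun acc ch => PySem.Str.replace acc ch " ") (PySem.Str.lower text) with hs2
    set t := normalize_text text with htdef
    have hnorm : t = PySem.Str.join " " (PySem.Str.split₀ s2) := by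
      rw [htdef]; simp [normalize_text, hbeq, hs2]
    have ht : t.toList = PySem.Chars.join [' '] ((PySem.Str.split₀ s2).map String.toList) := by
      rw [hnorm, PySem.Str.toList_join]
      congr 1
    have hW : OkList ((PySem.Str.split₀ s2).map String.toList) := by
      rw [PySem.Str.split₀_map_toList]; exact split₀_ok _
    have hmem := core_mem t _ hW ht
    have hadj := core_adj t _ hW ht
    simp only [is_cs_program, is_cs_program_alt, ← htdef]
    rw [if_chain, range_any_eq_adjCS, hmem, hadj]
    simp only [Bool.or_assoc, Bool.or_comm]

-- ===== VERDICT (by name: the statement is the Claim_ definition above) =====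
theorem is_cs_program_spec : Claim_equal_is_cs_program := by
  intro text _
  unfold Spec_is_cs_program
  exact ports_agree text
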